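-- pv_equiv track=rewrite | github.com/ArnoldTchegou/COding_Assessments_Online | Minimum_lag.py | getMaxsimi
-- ===== SOURCE A (Python) =====
-- def getMaxsimi(list1, list2):
--     n = len(list1)
--     # Calculate initial similarity without any swaps
--     max_simi = sum(1 for k in range(n) if list1[k] == list2[k])
--
--     # Iterate through each pair of indices to consider swaps
--     for i in range(n):
--         for j in range(i + 1, n):
--             # Swap elements at positions i and j
--             list1[i], list1[j] = list1[j], list1[i]
--
--             # Calculate similarity after the swap
--             current_simi = sum(1 for k in range(n) if list1[k] == list2[k])
--
--             # Update max_simi if current_simi is greater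
--             max_simi = max(max_simi, current_simi)
--
--             # Swap back to original positions
--             list1[i], list1[j] = list1[j], list1[i]
--
--     return max_simi
-- ===== SOURCE B (Python) =====
-- def getMaxsimi(list1, list2):
--     n = len(list1)
--     base = sum(1 for k in range(n) if list1[k] == list2[k])
--     best = 0
--     for i in range(n):
--         ai, bi = list1[i], list2[i]
--         for j in range(i + 1, n):
--             aj, bj = list1[j], list2[j]
--             # only positions i and j change under the swap: O(1) delta
--             delta = (aj == bi) + (ai == bj) - (ai == bi) - (aj == bj)
--             if delta > best:
--                 best = delta
--     return base + best
-- ===== Notes on version B (the rewrite author's own statement) =====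
-- stated objective: faster
-- what changed: Instead of re-counting all n matches after every trial swap, B computes each swap's effect in O(1) from the only two positions that change and tracks the best delta.
import Mathlib
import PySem

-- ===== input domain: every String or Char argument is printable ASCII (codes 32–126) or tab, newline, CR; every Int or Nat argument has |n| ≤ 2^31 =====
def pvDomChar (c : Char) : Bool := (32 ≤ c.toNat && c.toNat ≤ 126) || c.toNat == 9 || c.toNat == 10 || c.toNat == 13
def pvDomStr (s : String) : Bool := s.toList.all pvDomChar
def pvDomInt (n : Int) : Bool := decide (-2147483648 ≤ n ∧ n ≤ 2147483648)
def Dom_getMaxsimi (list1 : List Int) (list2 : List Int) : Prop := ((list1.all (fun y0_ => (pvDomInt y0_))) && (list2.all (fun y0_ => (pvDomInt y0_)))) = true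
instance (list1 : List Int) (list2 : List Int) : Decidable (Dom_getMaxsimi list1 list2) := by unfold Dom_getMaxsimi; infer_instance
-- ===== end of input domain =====

-- B replaces A's full O(n) recount after each trial swap by an O(1) two-position delta, giving O(n^2) instead of O(n^3); A mutates list1 in place but restores it, so the net effect is return-value only.


-- ===== PORT A =====
-- sum(1 for k in range(n) if l1[k] == l2[k]); on Pre_ every index is in range, so getD's default is never used
def pvSimi (l1 l2 : List Int) (n : Nat) : Int :=
  (List.range n).foldl (fun acc k => if l1.getD k 0 = l2.getD k 0 then acc + 1 else acc) 0

def getMaxsimi (list1 : List Int) (list2 : List Int) : Int :=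
  let n := list1.length
  let maxSimi := pvSimi list1 list2 n
  (List.range n).foldl
    (fun m i =>
      (List.range' (i + 1) (n - (i + 1))).foldl
        (fun m' j =>
          -- list1 with positions i and j swapped (Python swaps, recounts, swaps back)
          let l' := (list1.set i (list1.getD j 0)).set j (list1.getD i 0)
          max m' (pvSimi l' list2 n)) m)
    maxSimi

-- ===== PORT B =====
-- O(1) change in the match count caused by swapping positions i and j of list1
def pvDelta (list1 list2 : List Int) (i j : Nat) : Int :=
  (if list1.getD j 0 = list2.getD i 0 then (1:Int) else 0)
  + (if list1.getD i 0 = list2.getD j 0 then 1 else 0)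
  - (if list1.getD i 0 = list2.getD i 0 then 1 else 0)
  - (if list1.getD j 0 = list2.getD j 0 then 1 else 0)

def getMaxsimi_alt (list1 : List Int) (list2 : List Int) : Int :=
  let n := list1.length
  let base := pvSimi list1 list2 n
  let best := (List.range n).foldl
    (fun b i =>
      (List.range' (i + 1) (n - (i + 1))).foldl
        (fun b' j =>
          let d := pvDelta list1 list2 i j
          if d > b' then d else b') b)
    0
  base + best

-- ===== PRECONDITION & SPEC =====
-- Pre_ excludes exactly the inputs where A raises IndexError: list2 shorter than list1.
def Pre_getMaxsimi (list1 : List Int) (list2 : List Int) : Prop := list1.length ≤ list2.length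
instance (list1 : List Int) (list2 : List Int) : Decidable (Pre_getMaxsimi list1 list2) := by unfold Pre_getMaxsimi; infer_instance
def pvWitness_getMaxsimi : List Int × List Int := ([1, 2, 3], [2, 1, 3])

def Spec_getMaxsimi (list1 : List Int) (list2 : List Int) (out : Int) : Prop := out = getMaxsimi_alt list1 list2
instance (list1 : List Int) (list2 : List Int) (out : Int) : Decidable (Spec_getMaxsimi list1 list2 out) := by unfold Spec_getMaxsimi; infer_instance

-- ===== CLAIM (what is proved, stated in full; the proofs are below) =====
def Claim_equal_getMaxsimi : Prop := ∀ (list1 : List Int) (list2 : List Int), Dom_getMaxsimi list1 list2 → Pre_getMaxsimi list1 list2 → Spec_getMaxsimi list1 list2 (getMaxsimi list1 list2)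

-- ===== LEMMAS AND PROOFS =====

-- pvSimi as a Finset sum of indicators
theorem pvSimi_eq_sum (l1 l2 : List Int) (n : Nat) :
    pvSimi l1 l2 n = ∑ k ∈ Finset.range n, (if l1.getD k 0 = l2.getD k 0 then (1:Int) else 0) := by
  unfold pvSimi
  induction n with
  | zero => simp
  | succ n ih =>
      rw [List.range_succ, List.foldl_append, Finset.sum_range_succ, ih]
      simp only [List.foldl_cons, List.foldl_nil]
      split_ifs <;> ring

-- the recount after swapping i and j equals base + O(1) delta
theorem simi_swap (l1 l2 : List Int) (i j : Nat)
    (hij : i < j) (hj : j < l1.length) :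
    pvSimi ((l1.set i (l1.getD j 0)).set j (l1.getD i 0)) l2 l1.length
      = pvSimi l1 l2 l1.length + pvDelta l1 l2 i j := by
  have hi : i < l1.length := lt_trans hij hj
  have hne : i ≠ j := Nat.ne_of_lt hij
  set l' := (l1.set i (l1.getD j 0)).set j (l1.getD i 0) with hl'
  have hgi : l'.getD i 0 = l1.getD j 0 := by
    simp only [hl', List.getD]
    rw [List.getElem?_set_ne (Ne.symm hne), List.getElem?_set_self (by simpa using hi)]
    rfl
  have hgj : l'.getD j 0 = l1.getD i 0 := by
    simp only [hl', List.getD]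
    rw [List.getElem?_set_self (by simpa using hj)]
    rfl
  have hgk : ∀ k, k ≠ i → k ≠ j → l'.getD k 0 = l1.getD k 0 := by
    intro k hki hkj
    simp only [hl', List.getD]
    rw [List.getElem?_set_ne (Ne.symm hkj), List.getElem?_set_ne (Ne.symm hki)]
  rw [pvSimi_eq_sum, pvSimi_eq_sum]
  have hsub : ∑ k ∈ Finset.range l1.length,
      ((if l'.getD k 0 = l2.getD k 0 then (1:Int) else 0)
        - (if l1.getD k 0 = l2.getD k 0 then (1:Int) else 0))
      = pvDelta l1 l2 i j := by
    have hvanish : ∀ k ∈ Finset.range l1.length, k ∉ ({i, j} : Finset ℕ) →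
        ((if l'.getD k 0 = l2.getD k 0 then (1:Int) else 0)
          - (if l1.getD k 0 = l2.getD k 0 then (1:Int) else 0)) = 0 := by
      intro k _ hk
      simp only [Finset.mem_insert, Finset.mem_singleton, not_or] at hk
      rw [hgk k hk.1 hk.2]; ring
    rw [← Finset.sum_subset (by
        intro k hk
        simp only [Finset.mem_insert, Finset.mem_singleton] at hk
        rcases hk with h | h <;> simp [h, Finset.mem_range, hi, hj]) hvanish]
    rw [Finset.sum_pair hne, hgi, hgj]
    unfold pvDelta
    ring
  calc ∑ k ∈ Finset.range l1.length, (if l'.getD k 0 = l2.getD k 0 then (1:Int) else 0)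
      = ∑ k ∈ Finset.range l1.length,
          ((if l1.getD k 0 = l2.getD k 0 then (1:Int) else 0)
            + ((if l'.getD k 0 = l2.getD k 0 then (1:Int) else 0)
              - (if l1.getD k 0 = l2.getD k 0 then (1:Int) else 0))) := by
        apply Finset.sum_congr rfl; intro k _; ring
    _ = _ := by rw [Finset.sum_add_distrib, hsub]

-- inner loop: A's running max of recounts = base + B's running max of deltas
theorem inner_shift (l1 l2 : List Int) (i : Nat) (Lj : List Nat)
    (hL : ∀ j ∈ Lj, i < j ∧ j < l1.length) (b : Int) :
    Lj.foldl (fun m' j =>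
        max m' (pvSimi ((l1.set i (l1.getD j 0)).set j (l1.getD i 0)) l2 l1.length))
      (pvSimi l1 l2 l1.length + b)
    = pvSimi l1 l2 l1.length
      + Lj.foldl (fun b' j => let d := pvDelta l1 l2 i j; if d > b' then d else b') b := by
  induction Lj generalizing b with
  | nil => simp
  | cons j t ih =>
      have hj := hL j (List.mem_cons_self ..)
      have ht : ∀ x ∈ t, i < x ∧ x < l1.length := fun x hx => hL x (List.mem_cons_of_mem _ hx)
      simp only [List.foldl_cons]
      rw [simi_swap l1 l2 i j hj.1 hj.2]
      have : max (pvSimi l1 l2 l1.length + b) (pvSimi l1 l2 l1.length + pvDelta l1 l2 i j)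
          = pvSimi l1 l2 l1.length + (let d := pvDelta l1 l2 i j; if d > b then d else b) := by
        simp only [max_def]; split_ifs <;> omega
      rw [this, ih ht]

-- outer loop
theorem outer_shift (l1 l2 : List Int) (Li : List Nat)
    (hL : ∀ i ∈ Li, i < l1.length) (b : Int) :
    Li.foldl (fun m i =>
        (List.range' (i + 1) (l1.length - (i + 1))).foldl
          (fun m' j =>
            max m' (pvSimi ((l1.set i (l1.getD j 0)).set j (l1.getD i 0)) l2 l1.length)) m)
      (pvSimi l1 l2 l1.length + b)
    = pvSimi l1 l2 l1.length
      + Li.foldl (fun bb i =>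
          (List.range' (i + 1) (l1.length - (i + 1))).foldl
            (fun b' j => let d := pvDelta l1 l2 i j; if d > b' then d else b') bb) b := by
  induction Li generalizing b with
  | nil => simp
  | cons i t ih =>
      have hi := hL i (List.mem_cons_self ..)
      have ht : ∀ x ∈ t, x < l1.length := fun x hx => hL x (List.mem_cons_of_mem _ hx)
      simp only [List.foldl_cons]
      rw [inner_shift l1 l2 i _ (by
        intro j hj
        rw [List.mem_range'_1] at hj
        omega) b, ih ht]

-- ===== VERDICT (by name: the statement is the Claim_ definition above) =====
theorem getMaxsimi_spec : Claim_equal_getMaxsimi := by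
  intro list1 list2 _ _
  unfold Spec_getMaxsimi getMaxsimi getMaxsimi_alt
  have h := outer_shift list1 list2 (List.range list1.length)
    (by intro i hi; exact List.mem_range.mp hi) 0
  simpa using h
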